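-- pv_equiv track=rewrite | github.com/AMDResearch/Riallto | npu/build/kernel.py | _get_ptr_type_depth
-- ===== SOURCE A (Python) =====
-- def _get_ptr_type_depth(arg) -> int:
--     arg = arg.rstrip()
--     count = 0
--     for i in reversed(arg):
--         if i == "*":
--             count += 1
--         else:
--             break
--     return count
-- ===== SOURCE B (Python) =====
-- def _get_ptr_type_depth(arg) -> int:
--     s = arg.rstrip()
--     last = -1
--     for i, c in enumerate(s):
--         if c != "*":
--             last = i
--     return len(s) - 1 - last
-- ===== Notes on version B (the rewrite author's own statement) =====
-- stated objective: alternative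
-- what changed: Instead of scanning backwards from the end with a counter and a break, B makes one forward pass recording the index of the last non-asterisk character and derives the trailing-asterisk count as len(s)-1-last; no counter, no early exit, opposite traversal order.
import Mathlib
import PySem

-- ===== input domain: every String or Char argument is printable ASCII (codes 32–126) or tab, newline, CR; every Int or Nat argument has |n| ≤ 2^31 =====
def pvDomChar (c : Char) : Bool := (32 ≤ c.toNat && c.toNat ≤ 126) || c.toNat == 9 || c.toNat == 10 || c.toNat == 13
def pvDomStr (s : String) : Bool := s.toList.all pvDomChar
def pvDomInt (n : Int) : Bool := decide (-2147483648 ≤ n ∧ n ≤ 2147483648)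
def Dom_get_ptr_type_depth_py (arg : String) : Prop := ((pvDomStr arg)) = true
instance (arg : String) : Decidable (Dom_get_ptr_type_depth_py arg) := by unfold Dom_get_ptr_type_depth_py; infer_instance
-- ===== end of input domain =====

-- B replaces A's backward scan-with-break and counter by one forward pass recording the
-- index of the last non-asterisk character, returning len(s) - 1 - last (objective: alternative).


-- ===== PORT A =====
-- 'for i in reversed(arg): if i == "*": count += 1 else: break' as structural recursion
-- over the reversed character list, carrying the running count.
def pvLoopA : List Char → Int → Int
  | [], count => count
  | c :: rest, count => if c = '*' then pvLoopA rest (count + 1) else count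

def get_ptr_type_depth_py (arg : String) : Int :=
  let arg := PySem.Str.rstrip arg
  pvLoopA arg.toList.reverse 0

-- ===== PORT B =====
-- 'for i, c in enumerate(s): if c != "*": last = i' as structural recursion carrying
-- the current index i and the last-seen non-asterisk index.
def pvLoopB : List Char → Int → Int → Int
  | [], _, last => last
  | c :: rest, i, last => pvLoopB rest (i + 1) (if c ≠ '*' then i else last)

def get_ptr_type_depth_py_alt (arg : String) : Int :=
  let s := (PySem.Str.rstrip arg).toList
  (s.length : Int) - 1 - pvLoopB s 0 (-1)

-- ===== PRECONDITION & SPEC =====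
def Spec_get_ptr_type_depth_py (arg : String) (out : Int) : Prop := out = get_ptr_type_depth_py_alt arg
instance (arg : String) (out : Int) : Decidable (Spec_get_ptr_type_depth_py arg out) := by unfold Spec_get_ptr_type_depth_py; infer_instance

-- ===== CLAIM (what is proved, stated in full; the proofs are below) =====
def Claim_equal_get_ptr_type_depth_py : Prop := ∀ (arg : String), Dom_get_ptr_type_depth_py arg → Spec_get_ptr_type_depth_py arg (get_ptr_type_depth_py arg)

-- ===== LEMMAS AND PROOFS =====
theorem pvLoopA_eq_takeWhile (l : List Char) (c : Int) :
    pvLoopA l c = c + (l.takeWhile (· == '*')).length := by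
  induction l generalizing c with
  | nil => simp [pvLoopA]
  | cons x xs ih =>
    by_cases hx : x = '*' <;>
      simp [pvLoopA, hx, ih] <;> omega

theorem pvLoopB_append (l : List Char) (c : Char) (i last : Int) :
    pvLoopB (l ++ [c]) i last
      = if c ≠ '*' then i + l.length else pvLoopB l i last := by
  induction l generalizing i last with
  | nil => by_cases hc : c = '*' <;> simp [pvLoopB, hc]
  | cons x xs ih =>
    simp only [List.cons_append, pvLoopB, ih]
    by_cases hc : c = '*' <;> simp [hc] <;> push_cast <;> ring

-- The forward pass's last-non-'*' index equals length − 1 − (trailing-'*' count).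
theorem pvLoopB_char (l : List Char) :
    pvLoopB l 0 (-1)
      = (l.length : Int) - 1 - (l.reverse.takeWhile (· == '*')).length := by
  induction l using List.reverseRecOn with
  | nil => simp [pvLoopB]
  | append_singleton xs c ih =>
    by_cases hc : c = '*' <;>
      simp [pvLoopB_append, hc, ih] <;> omega

-- ===== VERDICT (by name: the statement is the Claim_ definition above) =====
theorem get_ptr_type_depth_py_spec : Claim_equal_get_ptr_type_depth_py := by
  intro arg _
  unfold Spec_get_ptr_type_depth_py get_ptr_type_depth_py get_ptr_type_depth_py_alt
  simp only [pvLoopA_eq_takeWhile, pvLoopB_char, zero_add]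
  have hle : ((PySem.Str.rstrip arg).toList.reverse.takeWhile (· == '*')).length
      ≤ (PySem.Str.rstrip arg).toList.length := by
    simpa using (List.takeWhile_sublist (p := (· == '*'))
      (l := (PySem.Str.rstrip arg).toList.reverse)).length_le
  omega
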